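-- pv_equiv track=rewrite | github.com/kys061/kr-stock-skills | skills/kr-bubble-detector/scripts/bubble_scorer.py | classify_risk_zone
-- ===== SOURCE A (Python) =====
-- RISK_ZONES = [
--     {'name': 'Normal',        'min': 0,  'max': 4,  'label': '정상',     'budget': '100%'},
--     {'name': 'Caution',       'min': 5,  'max': 7,  'label': '주의',     'budget': '70-80%'},
--     {'name': 'Elevated_Risk', 'min': 8,  'max': 9,  'label': '위험 상승', 'budget': '50-70%'},
--     {'name': 'Euphoria',      'min': 10, 'max': 12, 'label': '유포리아', 'budget': '40-50%'},
--     {'name': 'Critical',      'min': 13, 'max': 15, 'label': '위기',     'budget': '20-30%'},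
-- ]
--
-- def classify_risk_zone(total_score: int) -> dict:
--     """총점으로 리스크 존 분류.
--
--     Args:
--         total_score: 정량 + 정성 합산 (0-15)
--     Returns:
--         {'name': str, 'label': str, 'budget': str}
--     """
--     clamped = max(0, min(total_score, 15))
--     for zone in RISK_ZONES:
--         if zone['min'] <= clamped <= zone['max']:
--             return {
--                 'name': zone['name'],
--                 'label': zone['label'],
--                 'budget': zone['budget'],
--             }
--     return {'name': 'Normal', 'label': '정상', 'budget': '100%'}
-- ===== SOURCE B (Python) =====
-- RISK_ZONES = [
--     {'name': 'Normal',        'min': 0,  'max': 4,  'label': '정상',     'budget': '100%'},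
--     {'name': 'Caution',       'min': 5,  'max': 7,  'label': '주의',     'budget': '70-80%'},
--     {'name': 'Elevated_Risk', 'min': 8,  'max': 9,  'label': '위험 상승', 'budget': '50-70%'},
--     {'name': 'Euphoria',      'min': 10, 'max': 12, 'label': '유포리아', 'budget': '40-50%'},
--     {'name': 'Critical',      'min': 13, 'max': 15, 'label': '위기',     'budget': '20-30%'},
-- ]
--
-- # Flat lookup table built once: index 0..15 -> result dict (no scan at call time).
-- ZONE_BY_SCORE = [
--     {'name': z['name'], 'label': z['label'], 'budget': z['budget']}
--     for z in RISK_ZONES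
--     for _ in range(z['max'] - z['min'] + 1)
-- ]
--
-- def classify_risk_zone(total_score: int) -> dict:
--     return ZONE_BY_SCORE[max(0, min(total_score, 15))]
-- ===== Notes on version B (the rewrite author's own statement) =====
-- stated objective: idiomatic
-- what changed: Replaces the per-call linear scan over RISK_ZONES range checks with a flat per-clamped-score lookup table built once at module load and a single index access.
import Mathlib
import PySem

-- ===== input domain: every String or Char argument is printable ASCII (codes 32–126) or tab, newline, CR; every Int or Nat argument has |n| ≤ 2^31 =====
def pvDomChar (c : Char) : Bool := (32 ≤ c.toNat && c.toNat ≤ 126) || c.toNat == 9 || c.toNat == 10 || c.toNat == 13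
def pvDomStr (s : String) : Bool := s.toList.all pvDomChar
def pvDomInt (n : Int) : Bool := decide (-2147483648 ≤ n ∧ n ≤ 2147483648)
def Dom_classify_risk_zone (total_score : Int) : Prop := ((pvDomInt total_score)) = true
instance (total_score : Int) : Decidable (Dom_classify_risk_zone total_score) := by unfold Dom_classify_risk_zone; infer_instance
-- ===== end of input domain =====

-- B replaces A's per-call linear scan over zone ranges with a flat score-indexed
-- table built once and a single clamped index lookup (idiomatic / O(1) per call).

-- ===== PORT A =====
-- zone record: (name, min, max, label, budget)
def RISK_ZONES : List (String × Int × Int × String × String) :=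
  [ ("Normal", 0, 4, "정상", "100%")
  , ("Caution", 5, 7, "주의", "70-80%")
  , ("Elevated_Risk", 8, 9, "위험 상승", "50-70%")
  , ("Euphoria", 10, 12, "유포리아", "40-50%")
  , ("Critical", 13, 15, "위기", "20-30%") ]

-- the for-loop with early return, as structural recursion over RISK_ZONES
def classifyLoop (clamped : Int) : List (String × Int × Int × String × String) → List (String × String)
  | [] => [("name", "Normal"), ("label", "정상"), ("budget", "100%")]
  | (name, mn, mx, label, budget) :: rest =>
      if mn ≤ clamped ∧ clamped ≤ mx then
        [("name", name), ("label", label), ("budget", budget)]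
      else classifyLoop clamped rest

def classify_risk_zone (total_score : Int) : List (String × String) :=
  let clamped := max 0 (min total_score 15)
  classifyLoop clamped RISK_ZONES

-- ===== PORT B =====
-- the module-load comprehension: one entry per score in each zone's range
def ZONE_BY_SCORE : List (List (String × String)) :=
  RISK_ZONES.flatMap (fun (name, mn, mx, label, budget) =>
    (PySem.List.pyRange mn (mx + 1) 1).map (fun _ =>
      [("name", name), ("label", label), ("budget", budget)]))

def classify_risk_zone_alt (total_score : Int) : List (String × String) :=
  (PySem.List.pyGet? ZONE_BY_SCORE (max 0 (min total_score 15))).getD []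

-- ===== PRECONDITION & SPEC =====
def Spec_classify_risk_zone (total_score : Int) (out : List (String × String)) : Prop := out = classify_risk_zone_alt total_score
instance (total_score : Int) (out : List (String × String)) : Decidable (Spec_classify_risk_zone total_score out) := by unfold Spec_classify_risk_zone; infer_instance

-- ===== CLAIM (what is proved, stated in full; the proofs are below) =====
def Claim_equal_classify_risk_zone : Prop := ∀ (total_score : Int), Dom_classify_risk_zone total_score → Spec_classify_risk_zone total_score (classify_risk_zone total_score)

-- ===== LEMMAS AND PROOFS =====
-- the clamped score is one of 0..15, so both sides reduce by case analysis
lemma agree_on_clamped (c : Int) (h0 : 0 ≤ c) (h15 : c ≤ 15) :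
    classifyLoop c RISK_ZONES = (PySem.List.pyGet? ZONE_BY_SCORE c).getD [] := by
  interval_cases c <;> decide

-- ===== VERDICT (by name: the statement is the Claim_ definition above) =====
theorem classify_risk_zone_spec : Claim_equal_classify_risk_zone := by
  intro t _
  unfold Spec_classify_risk_zone classify_risk_zone classify_risk_zone_alt
  exact agree_on_clamped _ (by omega) (by omega)
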